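-- pv_equiv track=rewrite | github.com/jlparkI/AntPack | tests/test_local_database_management.py | get_kmer_counts
-- ===== SOURCE A (Python) =====
-- AAMAP = {k:i for i,k in enumerate("ACDEFGHIKLMNPQRSTVWY-")}
--
-- def get_kmer_counts(msa, cdr_labels):
--     """Extract kmers from the cdrs of an msa and
--     count the number present of each."""
--     dimer_count_tables = {}
--
--     cdr_start = cdr_labels.index('cdr3')
--     cdr_end = cdr_labels.index('fmwk4')
--     ndimers = cdr_end - cdr_start - 1
--
--     for m in msa:
--         cdr = m[cdr_start:cdr_end]
--         cdrlen = len([a for a in cdr if a != '-'])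
--         if cdrlen not in dimer_count_tables:
--             dimer_count_tables[cdrlen] = [0] * ndimers * 21 * 21
--         for i in range(ndimers):
--             kmer_code = AAMAP[cdr[i]] * 21 + AAMAP[cdr[i+1]]
--             dimer_count_tables[cdrlen][kmer_code+i*21*21] += 1
--
--     return dimer_count_tables
-- ===== SOURCE B (Python) =====
-- AAMAP = {k:i for i,k in enumerate("ACDEFGHIKLMNPQRSTVWY-")}
--
-- def get_kmer_counts(msa, cdr_labels):
--     """Two-phase version: first bucket the CDR slices by gap-free length,
--     then count dimer codes per bucket into a sparse dict and materialize
--     each bucket as the dense list at the end."""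
--     cdr_start = cdr_labels.index('cdr3')
--     cdr_end = cdr_labels.index('fmwk4')
--     ndimers = cdr_end - cdr_start - 1
--
--     buckets = {}
--     for m in msa:
--         cdr = m[cdr_start:cdr_end]
--         cdrlen = sum(1 for a in cdr if a != '-')
--         buckets.setdefault(cdrlen, []).append(cdr)
--
--     dimer_count_tables = {}
--     for cdrlen, cdrs in buckets.items():
--         counts = {}
--         for cdr in cdrs:
--             for i in range(ndimers):
--                 code = AAMAP[cdr[i]] * 21 + AAMAP[cdr[i + 1]] + i * 441
--                 counts[code] = counts.get(code, 0) + 1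
--         dimer_count_tables[cdrlen] = [counts.get(j, 0) for j in range(ndimers * 441)]
--     return dimer_count_tables
-- ===== Notes on version B (the rewrite author's own statement) =====
-- stated objective: alternative
-- what changed: Replaces the single interleaved pass that mutates preallocated dense zero tables with a two-phase shape: first partition rows into per-cdrlen buckets, then count dimer codes per bucket into a sparse dict and materialize each dense list in a separate final pass.
import Mathlib
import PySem

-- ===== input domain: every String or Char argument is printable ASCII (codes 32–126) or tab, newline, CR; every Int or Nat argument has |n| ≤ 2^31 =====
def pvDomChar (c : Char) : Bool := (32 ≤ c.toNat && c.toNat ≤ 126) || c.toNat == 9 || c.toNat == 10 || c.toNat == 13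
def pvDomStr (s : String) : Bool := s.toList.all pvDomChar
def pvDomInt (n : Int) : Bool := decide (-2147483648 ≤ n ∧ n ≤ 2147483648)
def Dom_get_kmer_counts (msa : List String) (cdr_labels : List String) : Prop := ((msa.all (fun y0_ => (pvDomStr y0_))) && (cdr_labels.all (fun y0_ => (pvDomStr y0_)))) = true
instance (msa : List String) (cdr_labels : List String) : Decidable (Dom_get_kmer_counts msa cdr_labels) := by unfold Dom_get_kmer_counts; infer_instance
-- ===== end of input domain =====

-- B replaces A's single interleaved pass over preallocated dense zero tables by a two-phase
-- shape (bucket rows by cdrlen, then count into a sparse dict and materialize each dense list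
-- in a separate final pass); same result, same asymptotic cost (objective: alternative).

-- ===== PORT A =====
-- AAMAP = {k:i for i,k in enumerate("ACDEFGHIKLMNPQRSTVWY-")}
def pvAAMAP : PySem.Dict Char Int :=
  (PySem.List.enumerate "ACDEFGHIKLMNPQRSTVWY-".toList 0).foldl
    (fun d p => d.insert p.2 p.1) PySem.Dict.empty

-- tbl[idx] += 1 ; exact where 0 ≤ idx < tbl.length (Python raises IndexError otherwise — outside Pre_)
def pvIncr (tbl : List Int) (idx : Int) : List Int :=
  tbl.set idx.toNat (PySem.List.pyGetD tbl idx 0 + 1)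

-- AAMAP[cdr[i]]: the getD defaults are exact wherever Python does not raise (in-range index,
-- char present in AAMAP); where Python raises KeyError/IndexError the input is outside Pre_.
def get_kmer_counts (msa : List String) (cdr_labels : List String) : List (Int × List Int) :=
  match PySem.List.index? cdr_labels "cdr3", PySem.List.index? cdr_labels "fmwk4" with
  | some cs, some ce =>
      let cdr_start : Int := (cs : Int)
      let cdr_end : Int := (ce : Int)
      let ndimers : Int := cdr_end - cdr_start - 1
      (msa.foldl (fun (d : PySem.Dict Int (List Int)) m =>
        let cdr := PySem.List.slice m.toList (some cdr_start) (some cdr_end)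
        let cdrlen : Int := ((cdr.filter (fun a => a != '-')).length : Int)
        let d := if d.contains cdrlen then d
                 else d.insert cdrlen
                   (PySem.List.pyRepeat (PySem.List.pyRepeat (PySem.List.pyRepeat [(0 : Int)] ndimers) 21) 21)
        (PySem.List.pyRange 0 ndimers 1).foldl (fun d i =>
          let kmer_code : Int :=
            pvAAMAP.getD (PySem.List.pyGetD cdr i ' ') 0 * 21 +
              pvAAMAP.getD (PySem.List.pyGetD cdr (i + 1) ' ') 0
          d.modify cdrlen [] (fun tbl => pvIncr tbl (kmer_code + i * 21 * 21))) d)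
        PySem.Dict.empty).items
  | _, _ => []  -- Python raises ValueError here (outside Pre_)

-- ===== PORT B =====
def pvAAMAP_B : PySem.Dict Char Int :=
  (PySem.List.enumerate "ACDEFGHIKLMNPQRSTVWY-".toList 0).foldl
    (fun d p => d.insert p.2 p.1) PySem.Dict.empty

-- buckets.setdefault(cdrlen, []).append(cdr) is ported as its net effect
-- buckets[cdrlen] = buckets.get(cdrlen, []) + [cdr], i.e. Dict.modify.
def get_kmer_counts_alt (msa : List String) (cdr_labels : List String) : List (Int × List Int) :=
  match PySem.List.index? cdr_labels "cdr3" with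
  | none => []  -- Python raises ValueError here (outside Pre_)
  | some cs =>
    match PySem.List.index? cdr_labels "fmwk4" with
    | none => []  -- Python raises ValueError here (outside Pre_)
    | some ce =>
      let ndimers : Int := (ce : Int) - (cs : Int) - 1
      let buckets := msa.foldl (fun (b : PySem.Dict Int (List (List Char))) m =>
          let cdr := PySem.List.slice m.toList (some (cs : Int)) (some (ce : Int))
          b.modify ((cdr.countP (fun a => a != '-') : Int)) [] (fun l => l ++ [cdr]))
        PySem.Dict.empty
      (buckets.items.foldl (fun (out : PySem.Dict Int (List Int)) p =>
          let counts := p.2.foldl (fun (c : PySem.Dict Int Int) cdr =>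
              (PySem.List.pyRange 0 ndimers 1).foldl (fun c i =>
                c.modify
                  (pvAAMAP_B.getD (PySem.List.pyGetD cdr i ' ') 0 * 21 +
                    pvAAMAP_B.getD (PySem.List.pyGetD cdr (i + 1) ' ') 0 + i * 441)
                  0 (· + 1)) c)
            PySem.Dict.empty
          out.insert p.1 ((PySem.List.pyRange 0 (ndimers * 441) 1).map (fun j => counts.getD j 0)))
        PySem.Dict.empty).items

-- ===== PRECONDITION & SPEC =====
-- Pre_: exactly the inputs where the Python A returns: both labels present, and whenever the
-- slice actually yields dimers (index 'fmwk4' ≥ index 'cdr3' + 2) every msa row must reach the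
-- slice end and consist, on the slice, of characters of the AAMAP alphabet (else IndexError/KeyError).
def Pre_get_kmer_counts (msa : List String) (cdr_labels : List String) : Prop :=
  (cdr_labels.contains "cdr3" && cdr_labels.contains "fmwk4" &&
    (!(cdr_labels.idxOf "cdr3" + 2 ≤ cdr_labels.idxOf "fmwk4") ||
      msa.all (fun m =>
        decide (cdr_labels.idxOf "fmwk4" ≤ m.toList.length) &&
        ((m.toList.drop (cdr_labels.idxOf "cdr3")).take
            (cdr_labels.idxOf "fmwk4" - cdr_labels.idxOf "cdr3")).all
          (fun c => "ACDEFGHIKLMNPQRSTVWY-".toList.contains c)))) = true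
instance (msa : List String) (cdr_labels : List String) : Decidable (Pre_get_kmer_counts msa cdr_labels) := by
  unfold Pre_get_kmer_counts; infer_instance

def pvWitness_get_kmer_counts : List String × List String := (["AC", "G-T"], ["cdr3", "x", "fmwk4"])

def Spec_get_kmer_counts (msa : List String) (cdr_labels : List String) (out : List (Int × List Int)) : Prop := out = get_kmer_counts_alt msa cdr_labels
instance (msa : List String) (cdr_labels : List String) (out : List (Int × List Int)) : Decidable (Spec_get_kmer_counts msa cdr_labels out) := by unfold Spec_get_kmer_counts; infer_instance

-- ===== CLAIM (what is proved, stated in full; the proofs are below) =====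
def Claim_equal_get_kmer_counts : Prop := ∀ (msa : List String) (cdr_labels : List String), Dom_get_kmer_counts msa cdr_labels → Pre_get_kmer_counts msa cdr_labels → Spec_get_kmer_counts msa cdr_labels (get_kmer_counts msa cdr_labels)

-- ===== LEMMAS AND PROOFS =====

-- Proof-side vocabulary: the cdr slice of a row, its gap-free length (the dict key),
-- the flat dimer codes of a cdr, and the concatenated codes of all rows with a given key.
def pvCdrOf (cs ce : Nat) (m : String) : List Char :=
  PySem.List.slice m.toList (some (cs : Int)) (some (ce : Int))
def pvKeyC (c : List Char) : Int := (c.countP (fun a => a != '-') : Int)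
def pvCodeAt (c : List Char) (i : Int) : Int :=
  pvAAMAP.getD (PySem.List.pyGetD c i ' ') 0 * 21 +
    pvAAMAP.getD (PySem.List.pyGetD c (i + 1) ' ') 0 + i * 441
def pvCodes (nd : Int) (c : List Char) : List Int :=
  (PySem.List.pyRange 0 nd 1).map (pvCodeAt c)
def pvCL (nd : Int) (cdrs : List (List Char)) (L : Int) : List Int :=
  (cdrs.filter (fun c => pvKeyC c == L)).flatMap (pvCodes nd)
def pvZeros (nd : Int) : List Int :=
  PySem.List.pyRepeat (PySem.List.pyRepeat (PySem.List.pyRepeat [(0 : Int)] nd) 21) 21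
def pvAddC (tbl : List Int) (cl : List Int) : List Int := cl.foldl pvIncr tbl
def pvCnt (nd : Int) (cl : List Int) : List Int :=
  (PySem.List.pyRange 0 (nd * 441) 1).map (fun j => (cl.count j : Int))
-- A's net effect on one row, as a single dict operation
def pvStepA (nd : Int) (d : PySem.Dict Int (List Int)) (c : List Char) : PySem.Dict Int (List Int) :=
  (if d.contains (pvKeyC c) then d else d.insert (pvKeyC c) (pvZeros nd)).modify
    (pvKeyC c) [] (fun tbl => pvAddC tbl (pvCodes nd c))

theorem pv_modify_modify (d : PySem.Dict Int (List Int)) (k : Int) (f g : List Int → List Int) :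
    (d.modify k [] f).modify k [] g = d.modify k [] (fun t => g (f t)) := by
  simp [PySem.Dict.modify, PySem.Dict.getD_insert_self, PySem.Dict.insert_insert_self]

theorem pv_insert_getD_self (d : PySem.Dict Int (List Int)) (k : Int) (d0 : List Int)
    (hc : d.contains k = true) (hn : d.keys.Nodup) : d.insert k (d.getD k d0) = d := by
  apply PySem.Dict.ext
  rw [PySem.Dict.items_insert_of_contains _ _ hc]
  conv_rhs => rw [← List.map_id d.items]
  apply List.map_congr_left
  intro p hp
  obtain ⟨p1, p2⟩ := p
  have hv : d.getD p1 d0 = p2 := PySem.Dict.getD_of_mem_items d hp hn d0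
  by_cases h : p1 = k
  · subst h
    simp [← hv]
  · simp [h]

theorem pv_modify_foldl (l : List Int) : ∀ (d : PySem.Dict Int (List Int)) (k : Int),
    d.contains k = true → d.keys.Nodup →
    l.foldl (fun d idx => d.modify k [] (fun tbl => pvIncr tbl idx)) d
      = d.modify k [] (fun tbl => pvAddC tbl l) := by
  induction l with
  | nil =>
    intro d k hc hn
    simp only [List.foldl_nil, pvAddC, PySem.Dict.modify]
    exact (pv_insert_getD_self d k [] hc hn).symm
  | cons x l ih =>
    intro d k hc hn
    rw [List.foldl_cons, ih _ k (by simp [PySem.Dict.contains_modify]) (by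
        have : (d.modify k [] (fun tbl => pvIncr tbl x)).keys = d.keys := by
          rw [PySem.Dict.keys_modify, PySem.Dict.keys_insert_of_contains _ _ hc]
        rw [this]; exact hn),
      pv_modify_modify]
    rfl

theorem pv_keys_stepA (nd : Int) (d : PySem.Dict Int (List Int)) (c : List Char) :
    (pvStepA nd d c).keys = PySem.Set.add d.keys (pvKeyC c) := by
  unfold pvStepA
  by_cases hc : d.contains (pvKeyC c) = true
  · rw [if_pos hc, PySem.Dict.keys_modify, PySem.Dict.keys_insert_of_contains _ _ hc,
      PySem.Set.add, if_pos (by simpa [PySem.Set.contains, ← PySem.Dict.contains_iff_mem_keys] using hc)]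
  · rw [if_neg hc, PySem.Dict.keys_modify,
      PySem.Dict.keys_insert_of_contains _ _ (PySem.Dict.contains_insert_self _ _ _),
      PySem.Dict.keys_insert_of_not_contains _ _ (by simpa using hc),
      PySem.Set.add, if_neg (by simpa [PySem.Set.contains, ← PySem.Dict.contains_iff_mem_keys] using hc)]

theorem pv_keys_foldA (nd : Int) : ∀ (cdrs : List (List Char)) (d : PySem.Dict Int (List Int)),
    (cdrs.foldl (pvStepA nd) d).keys = PySem.Set.update d.keys (cdrs.map pvKeyC) := by
  intro cdrs
  induction cdrs with
  | nil => intro d; simp [PySem.Set.update]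
  | cons c cdrs ih => intro d; rw [List.foldl_cons, ih, pv_keys_stepA]; rfl

theorem pv_nodup_set_add (s : PySem.Set Int) (x : Int) (h : s.Nodup) :
    (PySem.Set.add s x).Nodup := by
  rw [PySem.Set.add]
  split
  · exact h
  · next hc =>
    simp only [PySem.Set.contains] at hc
    rw [List.nodup_append]
    refine ⟨h, List.nodup_singleton x, ?_⟩
    intro a ha b hb
    rw [List.mem_singleton] at hb
    subst hb
    exact fun h' => hc (List.contains_iff_mem.mpr (h' ▸ ha))

theorem pv_nodup_update (l : List Int) : ∀ (s : PySem.Set Int), s.Nodup → (PySem.Set.update s l).Nodup := by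
  induction l with
  | nil => intro s h; exact h
  | cons x l ih => intro s h; exact ih _ (pv_nodup_set_add s x h)

theorem pv_get?_stepA (nd : Int) (d : PySem.Dict Int (List Int)) (c : List Char) (L : Int) :
    (pvStepA nd d c).get? L =
      if L = pvKeyC c then
        some (pvAddC ((d.get? (pvKeyC c)).getD (pvZeros nd)) (pvCodes nd c))
      else d.get? L := by
  unfold pvStepA
  cases hg : d.get? (pvKeyC c) with
  | none =>
    have hc : d.contains (pvKeyC c) = false := by
      have := PySem.Dict.get?_eq_none_iff_contains d (pvKeyC c)
      simp [hg] at this; exact this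
    rw [if_neg (by simp [hc])]
    simp only [PySem.Dict.modify, PySem.Dict.getD_insert_self, PySem.Dict.insert_insert_self]
    rw [PySem.Dict.get?_insert]
    simp
  | some tbl =>
    have hc : d.contains (pvKeyC c) = true := by
      rw [PySem.Dict.contains_eq_isSome_get?, hg]; rfl
    rw [if_pos hc]
    simp only [PySem.Dict.modify]
    rw [PySem.Dict.get?_insert]
    have : d.getD (pvKeyC c) [] = tbl := PySem.Dict.getD_of_get?_eq_some d [] hg
    simp [this]

theorem pv_get?_foldA (nd : Int) : ∀ (cdrs : List (List Char)) (d : PySem.Dict Int (List Int)) (L : Int),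
    (cdrs.foldl (pvStepA nd) d).get? L =
      match d.get? L with
      | some tbl => some (pvAddC tbl (pvCL nd cdrs L))
      | none =>
          if L ∈ cdrs.map pvKeyC then some (pvAddC (pvZeros nd) (pvCL nd cdrs L)) else none := by
  intro cdrs
  induction cdrs with
  | nil =>
    intro d L
    cases h : d.get? L <;> simp [pvCL, pvAddC, h]
  | cons c cdrs ih =>
    intro d L
    rw [List.foldl_cons, ih, pv_get?_stepA]
    have hCL : ∀ M, pvCL nd (c :: cdrs) M =
        if pvKeyC c == M then pvCodes nd c ++ pvCL nd cdrs M else pvCL nd cdrs M := by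
      intro M
      simp only [pvCL, List.filter_cons]
      split <;> simp_all
    by_cases hL : L = pvKeyC c
    · subst hL
      cases hg : d.get? (pvKeyC c) with
      | none =>
        simp [hCL, pvAddC, List.foldl_append]
      | some tbl =>
        simp [hCL, pvAddC, List.foldl_append]
    · cases hg : d.get? L with
      | none =>
        have : (pvKeyC c == L) = false := by simp [Ne.symm hL]
        simp [hCL, this, hL]
      | some tbl =>
        have : (pvKeyC c == L) = false := by simp [Ne.symm hL]
        simp [hCL, this, hL]

theorem pv_items_char {ν : Type} (d : PySem.Dict Int ν) (d0 : ν) (h : d.keys.Nodup) :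
    d.items = d.keys.map (fun k => (k, d.getD k d0)) := by
  have : d.keys.map (fun k => (k, d.getD k d0)) = d.items.map (fun p => (p.1, d.getD p.1 d0)) := by
    simp [PySem.Dict.keys, List.map_map, Function.comp]
  rw [this]
  symm
  calc d.items.map (fun p => (p.1, d.getD p.1 d0)) = d.items.map id := by
        apply List.map_congr_left
        intro p hp
        have : d.getD p.1 d0 = p.2 := PySem.Dict.getD_of_mem_items d (by simpa using hp) h d0
        simp [this]
    _ = d.items := List.map_id _

-- zeros table is a replicate
theorem pv_zeros_eq (nd : Int) : pvZeros nd = List.replicate ((nd * 441).toNat) 0 := by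
  rw [pvZeros, PySem.List.pyRepeat_singleton]
  show (List.replicate (Int.toNat 21) _).flatten = _
  rw [show Int.toNat 21 = 21 from rfl]
  rw [show PySem.List.pyRepeat (List.replicate nd.toNat (0:Int)) 21
        = (List.replicate (Int.toNat 21) (List.replicate nd.toNat (0:Int))).flatten from rfl,
    show Int.toNat 21 = 21 from rfl, List.flatten_replicate_replicate,
    List.flatten_replicate_replicate]
  congr 1
  omega

theorem pv_length_addC (cl : List Int) : ∀ (tbl : List Int), (pvAddC tbl cl).length = tbl.length := by
  induction cl with
  | nil => intro tbl; rfl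
  | cons x cl ih =>
    intro tbl
    show (pvAddC (pvIncr tbl x) cl).length = _
    rw [ih, pvIncr, List.length_set]

theorem pv_getElem_addC (cl : List Int) : ∀ (tbl : List Int),
    (∀ x ∈ cl, 0 ≤ x ∧ x < (tbl.length : Int)) → ∀ (j : Nat) (hj : j < tbl.length),
    (pvAddC tbl cl)[j]'(by rw [pv_length_addC]; exact hj) = tbl[j] + (cl.count (j : Int) : Int) := by
  induction cl with
  | nil => intro tbl _ j hj; simp [pvAddC]
  | cons x cl ih =>
    intro tbl hb j hj
    have hx := hb x (by simp)
    have hlen : (pvIncr tbl x).length = tbl.length := by rw [pvIncr, List.length_set]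
    have hb' : ∀ y ∈ cl, 0 ≤ y ∧ y < ((pvIncr tbl x).length : Int) := by
      intro y hy; rw [hlen]; exact hb y (by simp [hy])
    have hstep := ih (pvIncr tbl x) hb' j (by rw [hlen]; exact hj)
    have hIncr : (pvIncr tbl x)[j]'(by rw [hlen]; exact hj)
        = if x.toNat = j then tbl[j] + 1 else tbl[j] := by
      simp only [pvIncr, List.getElem_set]
      have : PySem.List.pyGetD tbl x 0 = tbl[x.toNat]'(by omega) := by
        rw [PySem.List.pyGetD_of_nonneg _ _ hx.1]
        rw [List.getD_eq_getElem _ _ (by omega)]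
      split
      · next h => subst h; rw [this]
      · rfl
    refine hstep.trans ?_
    rw [hIncr, List.count_cons]
    by_cases hxj : x = (j : Int)
    · have hn : x.toNat = j := by omega
      simp [hxj]
      omega
    · have hn : x.toNat ≠ j := by omega
      simp [hxj, hn]

theorem pv_addC_eq_cnt (nd : Int) (cl : List Int)
    (h : ∀ x ∈ cl, 0 ≤ x ∧ x < nd * 441) : pvAddC (pvZeros nd) cl = pvCnt nd cl := by
  have hlenz : (pvZeros nd).length = (nd * 441).toNat := by rw [pv_zeros_eq]; simp
  have hb : ∀ x ∈ cl, 0 ≤ x ∧ x < ((pvZeros nd).length : Int) := by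
    intro x hx
    obtain ⟨h1, h2⟩ := h x hx
    refine ⟨h1, ?_⟩
    rw [hlenz]
    omega
  apply List.ext_getElem
  · rw [pv_length_addC, hlenz, pvCnt, List.length_map, PySem.List.length_pyRange_one]
    omega
  · intro j hj1 hj2
    rw [pv_getElem_addC cl (pvZeros nd) hb j (by rw [pv_length_addC] at hj1; exact hj1)]
    have hjz : j < (pvZeros nd).length := by rw [pv_length_addC] at hj1; exact hj1
    have : (pvZeros nd)[j] = 0 := by
      have := pv_zeros_eq nd
      simp [this]
    rw [this]
    simp only [pvCnt, List.getElem_map, PySem.List.getElem_pyRange_one]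
    simp

theorem pv_aamap_le (ch : Char) : 0 ≤ pvAAMAP.getD ch 0 ∧ pvAAMAP.getD ch 0 ≤ 20 := by
  rw [PySem.Dict.getD_eq_get?_getD]
  cases hg : pvAAMAP.get? ch with
  | none => simp
  | some v =>
    have hv : v ∈ pvAAMAP.values := List.mem_map_of_mem (PySem.Dict.mem_items_of_get?_eq_some pvAAMAP hg)
    have : ∀ w ∈ pvAAMAP.values, 0 ≤ w ∧ w ≤ 20 := by decide
    simpa using this v hv

theorem pv_codes_bounds (nd : Int) (c : List Char) :
    ∀ x ∈ pvCodes nd c, 0 ≤ x ∧ x < nd * 441 := by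
  intro x hx
  simp only [pvCodes, List.mem_map] at hx
  obtain ⟨i, hi, rfl⟩ := hx
  rw [PySem.List.mem_pyRange_one] at hi
  have h1 := pv_aamap_le (PySem.List.pyGetD c i ' ')
  have h2 := pv_aamap_le (PySem.List.pyGetD c (i + 1) ' ')
  rw [pvCodeAt]
  constructor <;> nlinarith [hi.1, hi.2, h1.1, h1.2, h2.1, h2.2]

theorem pv_CL_bounds (nd : Int) (cdrs : List (List Char)) (L : Int) :
    ∀ x ∈ pvCL nd cdrs L, 0 ≤ x ∧ x < nd * 441 := by
  intro x hx
  simp only [pvCL, List.mem_flatMap] at hx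
  obtain ⟨c, _, hc⟩ := hx
  exact pv_codes_bounds nd c x hc

-- A's port row step equals pvStepA (on a dict with distinct keys)
theorem pv_stepA_eq (nd : Int) (d : PySem.Dict Int (List Int)) (c : List Char) (hd : d.keys.Nodup) :
    (let cdrlen : Int := ((c.filter (fun a => a != '-')).length : Int)
     let d1 := if d.contains cdrlen then d
               else d.insert cdrlen
                 (PySem.List.pyRepeat (PySem.List.pyRepeat (PySem.List.pyRepeat [(0 : Int)] nd) 21) 21)
     (PySem.List.pyRange 0 nd 1).foldl (fun d i =>
        let kmer_code : Int :=
          pvAAMAP.getD (PySem.List.pyGetD c i ' ') 0 * 21 +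
            pvAAMAP.getD (PySem.List.pyGetD c (i + 1) ' ') 0
        d.modify cdrlen [] (fun tbl => pvIncr tbl (kmer_code + i * 21 * 21))) d1)
    = pvStepA nd d c := by
  have hk : ((c.filter (fun a => a != '-')).length : Int) = pvKeyC c := by
    rw [pvKeyC, List.countP_eq_length_filter]
  simp only [hk]
  set K := pvKeyC c with hK
  set d1 := if d.contains K then d else d.insert K (pvZeros nd) with hd1
  have hc1 : d1.contains K = true := by
    rw [hd1]; split
    · assumption
    · exact PySem.Dict.contains_insert_self d K (pvZeros nd)
  have hn1 : d1.keys.Nodup := by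
    rw [hd1]; split
    · exact hd
    · next h =>
      rw [PySem.Dict.keys_insert_of_not_contains _ _ (by simpa using h)]
      have hKm : K ∉ d.keys := by
        rw [← PySem.Dict.contains_iff_mem_keys]
        simp [h]
      rw [List.nodup_append]
      refine ⟨hd, List.nodup_singleton K, ?_⟩
      intro a ha b hb
      rw [List.mem_singleton] at hb
      subst hb
      exact fun h' => hKm (h' ▸ ha)
  have step : ∀ (d' : PySem.Dict Int (List Int)) (i : Int),
      d'.modify K [] (fun tbl => pvIncr tbl
        ((pvAAMAP.getD (PySem.List.pyGetD c i ' ') 0 * 21 +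
          pvAAMAP.getD (PySem.List.pyGetD c (i + 1) ' ') 0) + i * 21 * 21))
      = d'.modify K [] (fun tbl => pvIncr tbl (pvCodeAt c i)) := by
    intro d' i
    have : (pvAAMAP.getD (PySem.List.pyGetD c i ' ') 0 * 21 +
          pvAAMAP.getD (PySem.List.pyGetD c (i + 1) ' ') 0) + i * 21 * 21 = pvCodeAt c i := by
      rw [pvCodeAt]; ring
    rw [this]
  show (PySem.List.pyRange 0 nd 1).foldl _ d1 = _
  calc (PySem.List.pyRange 0 nd 1).foldl (fun d i =>
          d.modify K [] (fun tbl => pvIncr tbl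
            ((pvAAMAP.getD (PySem.List.pyGetD c i ' ') 0 * 21 +
              pvAAMAP.getD (PySem.List.pyGetD c (i + 1) ' ') 0) + i * 21 * 21))) d1
      = (PySem.List.pyRange 0 nd 1).foldl (fun d i =>
          d.modify K [] (fun tbl => pvIncr tbl (pvCodeAt c i))) d1 := by
        apply PySem.List.foldl_congr_mem
        intro acc x _
        exact step acc x
    _ = (pvCodes nd c).foldl (fun d idx => d.modify K [] (fun tbl => pvIncr tbl idx)) d1 := by
        rw [pvCodes, List.foldl_map]
    _ = d1.modify K [] (fun tbl => pvAddC tbl (pvCodes nd c)) := pv_modify_foldl _ d1 K hc1 hn1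
    _ = pvStepA nd d c := by rw [pvStepA, ← hd1, ← hK]

theorem pv_nodup_foldA (nd : Int) (cdrs : List (List Char)) :
    ((cdrs.foldl (pvStepA nd) PySem.Dict.empty).keys).Nodup := by
  rw [pv_keys_foldA]
  exact pv_nodup_update _ _ (by simp [PySem.Dict.keys_empty])

-- the port-A fold equals the pvStepA fold
theorem pv_foldA_eq (nd : Int) (cs ce : Nat) : ∀ (msa : List String) (d : PySem.Dict Int (List Int)),
    d.keys.Nodup →
    msa.foldl (fun (d : PySem.Dict Int (List Int)) m =>
      let cdr := PySem.List.slice m.toList (some (cs : Int)) (some (ce : Int))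
      let cdrlen : Int := ((cdr.filter (fun a => a != '-')).length : Int)
      let d := if d.contains cdrlen then d
               else d.insert cdrlen
                 (PySem.List.pyRepeat (PySem.List.pyRepeat (PySem.List.pyRepeat [(0 : Int)] nd) 21) 21)
      (PySem.List.pyRange 0 nd 1).foldl (fun d i =>
        let kmer_code : Int :=
          pvAAMAP.getD (PySem.List.pyGetD cdr i ' ') 0 * 21 +
            pvAAMAP.getD (PySem.List.pyGetD cdr (i + 1) ' ') 0
        d.modify cdrlen [] (fun tbl => pvIncr tbl (kmer_code + i * 21 * 21))) d) d
    = (msa.map (pvCdrOf cs ce)).foldl (pvStepA nd) d := by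
  intro msa
  induction msa with
  | nil => intro d _; rfl
  | cons m msa ih =>
    intro d hd
    rw [List.foldl_cons, List.map_cons, List.foldl_cons]
    rw [show (let cdr := PySem.List.slice m.toList (some (cs : Int)) (some (ce : Int))
      let cdrlen : Int := ((cdr.filter (fun a => a != '-')).length : Int)
      let d := if d.contains cdrlen then d
               else d.insert cdrlen
                 (PySem.List.pyRepeat (PySem.List.pyRepeat (PySem.List.pyRepeat [(0 : Int)] nd) 21) 21)
      (PySem.List.pyRange 0 nd 1).foldl (fun d i =>
        let kmer_code : Int :=
          pvAAMAP.getD (PySem.List.pyGetD cdr i ' ') 0 * 21 +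
            pvAAMAP.getD (PySem.List.pyGetD cdr (i + 1) ' ') 0
        d.modify cdrlen [] (fun tbl => pvIncr tbl (kmer_code + i * 21 * 21))) d)
      = pvStepA nd d (pvCdrOf cs ce m) from pv_stepA_eq nd d (pvCdrOf cs ce m) hd]
    apply ih
    rw [pv_keys_stepA]
    exact pv_nodup_set_add _ _ hd

-- ===== B-side =====
def pvBucketFoldC (cdrs : List (List Char)) : PySem.Dict Int (List (List Char)) :=
  cdrs.foldl (fun b c => b.modify (pvKeyC c) [] (fun l => l ++ [c])) PySem.Dict.empty

theorem pv_portB_buckets (cs ce : Nat) (msa : List String) :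
    msa.foldl (fun (b : PySem.Dict Int (List (List Char))) m =>
        let cdr := PySem.List.slice m.toList (some (cs : Int)) (some (ce : Int))
        b.modify ((cdr.countP (fun a => a != '-') : Int)) [] (fun l => l ++ [cdr]))
      PySem.Dict.empty
    = pvBucketFoldC (msa.map (pvCdrOf cs ce)) := by
  rw [pvBucketFoldC, List.foldl_map]
  rfl

theorem pv_bucket_keys (cdrs : List (List Char)) :
    (pvBucketFoldC cdrs).keys = PySem.Set.update [] (cdrs.map pvKeyC) := by
  rw [pvBucketFoldC,
    PySem.Dict.keys_foldl_modify_key cdrs pvKeyC [] (fun _ c => fun l => l ++ [c]),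
    PySem.Dict.keys_empty]

theorem pv_bucket_getD (cdrs : List (List Char)) (L : Int) :
    (pvBucketFoldC cdrs).getD L [] = cdrs.filter (fun c => pvKeyC c == L) := by
  rw [pvBucketFoldC, show cdrs.foldl (fun b c => b.modify (pvKeyC c) [] (fun l => l ++ [c])) PySem.Dict.empty
      = (cdrs.map (fun c => (pvKeyC c, c))).foldl
          (fun b p => b.modify p.1 [] (fun l => l ++ [p.2])) PySem.Dict.empty from by
        rw [List.foldl_map],
    PySem.Dict.getD_foldl_modify_append]
  simp [List.filter_map, List.map_map, Function.comp_def]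

theorem pv_counts_eq (nd : Int) (cdrs2 : List (List Char)) :
    cdrs2.foldl (fun (c : PySem.Dict Int Int) cdr =>
      (PySem.List.pyRange 0 nd 1).foldl (fun c i =>
        c.modify
          (pvAAMAP_B.getD (PySem.List.pyGetD cdr i ' ') 0 * 21 +
            pvAAMAP_B.getD (PySem.List.pyGetD cdr (i + 1) ' ') 0 + i * 441)
          0 (· + 1)) c) PySem.Dict.empty
    = PySem.Dict.counter (cdrs2.flatMap (pvCodes nd)) := by
  rw [PySem.Dict.counter_eq_foldl, List.foldl_flatMap]
  apply PySem.List.foldl_congr_mem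
  intro acc cdr _
  rw [pvCodes, List.foldl_map]
  rfl

theorem pv_out_items (nd : Int) (bk : PySem.Dict Int (List (List Char))) (hn : bk.keys.Nodup) :
    (bk.items.foldl (fun (out : PySem.Dict Int (List Int)) p =>
        let counts := p.2.foldl (fun (c : PySem.Dict Int Int) cdr =>
            (PySem.List.pyRange 0 nd 1).foldl (fun c i =>
              c.modify
                (pvAAMAP_B.getD (PySem.List.pyGetD cdr i ' ') 0 * 21 +
                  pvAAMAP_B.getD (PySem.List.pyGetD cdr (i + 1) ' ') 0 + i * 441)
                0 (· + 1)) c)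
          PySem.Dict.empty
        out.insert p.1 ((PySem.List.pyRange 0 (nd * 441) 1).map (fun j => counts.getD j 0)))
      PySem.Dict.empty).items
    = bk.items.map (fun p => (p.1, pvCnt nd (p.2.flatMap (pvCodes nd)))) := by
  rw [PySem.Dict.items_foldl_insert_fresh bk.items Prod.fst
      (fun p => ((PySem.List.pyRange 0 (nd * 441) 1).map (fun j =>
        (p.2.foldl (fun (c : PySem.Dict Int Int) cdr =>
            (PySem.List.pyRange 0 nd 1).foldl (fun c i =>
              c.modify
                (pvAAMAP_B.getD (PySem.List.pyGetD cdr i ' ') 0 * 21 +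
                  pvAAMAP_B.getD (PySem.List.pyGetD cdr (i + 1) ' ') 0 + i * 441)
                0 (· + 1)) c)
          PySem.Dict.empty).getD j 0)))
      PySem.Dict.empty
      (fun a _ => PySem.Dict.contains_empty a.1)
      (by exact hn)]
  rw [show (PySem.Dict.empty : PySem.Dict Int (List Int)).items = [] from rfl, List.nil_append]
  apply List.map_congr_left
  intro p _
  simp only [pv_counts_eq]
  simp [pvCnt, PySem.Dict.getD_counter]

-- ===== VERDICT (by name: the statement is the Claim_ definition above) =====
theorem get_kmer_counts_spec : Claim_equal_get_kmer_counts := by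
  intro msa cdr_labels _ _
  unfold Spec_get_kmer_counts
  cases h1 : PySem.List.index? cdr_labels "cdr3" with
  | none =>
    rw [PySem.List.index?_eq_idxOf?] at h1
    simp [get_kmer_counts, get_kmer_counts_alt, PySem.List.index?_eq_idxOf?, h1]
  | some cs =>
    cases h2 : PySem.List.index? cdr_labels "fmwk4" with
    | none =>
      rw [PySem.List.index?_eq_idxOf?] at h1 h2
      simp [get_kmer_counts, get_kmer_counts_alt, PySem.List.index?_eq_idxOf?, h1, h2]
    | some ce =>
      rw [PySem.List.index?_eq_idxOf?] at h1 h2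
      simp only [get_kmer_counts, get_kmer_counts_alt, PySem.List.index?_eq_idxOf?, h1, h2]
      rw [pv_foldA_eq ((ce : Int) - (cs : Int) - 1) cs ce msa PySem.Dict.empty
          (by rw [PySem.Dict.keys_empty]; exact List.nodup_nil)]
      rw [pv_portB_buckets cs ce msa]
      set nd : Int := (ce : Int) - (cs : Int) - 1 with hnd
      set cdrs : List (List Char) := msa.map (pvCdrOf cs ce) with hcdrs
      rw [pv_out_items nd (pvBucketFoldC cdrs)
          (by rw [pv_bucket_keys]; exact pv_nodup_update _ _ List.nodup_nil)]
      rw [pv_items_char (cdrs.foldl (pvStepA nd) PySem.Dict.empty) [] (pv_nodup_foldA nd cdrs)]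
      rw [pv_items_char (pvBucketFoldC cdrs) [] (by rw [pv_bucket_keys]; exact pv_nodup_update _ _ List.nodup_nil)]
      rw [pv_keys_foldA, pv_bucket_keys, PySem.Dict.keys_empty]
      conv_rhs => rw [List.map_map]
      apply List.map_congr_left
      intro L hL
      have hLmem : L ∈ cdrs.map pvKeyC := by
        have : PySem.Set.update ([] : PySem.Set Int) (cdrs.map pvKeyC)
            = PySem.Set.ofList (cdrs.map pvKeyC) := by
          rw [PySem.Set.ofList_eq_foldl]; rfl
        rw [this] at hL
        exact (PySem.Set.mem_ofList _ _).mp hL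
      have hA : (cdrs.foldl (pvStepA nd) PySem.Dict.empty).getD L [] = pvCnt nd (pvCL nd cdrs L) := by
        rw [PySem.Dict.getD_eq_get?_getD, pv_get?_foldA, PySem.Dict.get?_empty]
        simp only [hLmem, if_true]
        exact pv_addC_eq_cnt nd _ (pv_CL_bounds nd cdrs L)
      have hB : (pvBucketFoldC cdrs).getD L [] = cdrs.filter (fun c => pvKeyC c == L) :=
        pv_bucket_getD cdrs L
      simp only [Function.comp_def]
      rw [hA, hB]
      rfl
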